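-- pv_equiv track=rewrite | github.com/LouisLiuNova/VulnCodeCollector | nvd_api.py | resolve_vendor
-- ===== SOURCE A (Python) =====
-- def resolve_vendor(vendor_infos: list) -> dict:
--     """
--     Resolve vendor info from OpenCVE API response and return structured data.
--
--     Args:
--     vendor_infos: list: The vendor info list from OpenCVE API response like:
--     "vendor": [
--         "qemu",
--         "qemu$PRODUCT$qemu",
--         "redhat",
--         "redhat$PRODUCT$enterprise_linux",
--         "redhat$PRODUCT$openstack"
--     ]
--
--     Returns:
--     dict: The structured vendor info like:
--     {
--         "qemu": ["qemu"],
--         "redhat": ["enterprise_linux", "openstack"]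
--     }
--     """
--     result = dict()
--     for vendor in vendor_infos:
--         if "$PRODUCT$" in vendor:
--             vendor, product = vendor.split("$PRODUCT$")
--             if vendor in result and product not in result[vendor]:
--                 result[vendor].append(product)
--             elif vendor not in result:
--                 result[vendor] = [product]
--             else:
--                 pass  # 重复的vendor
--         else:
--             if vendor not in result:
--                 result[vendor] = [vendor]
--             elif vendor in result[vendor]:
--                 pass
--             else:
--                 result[vendor].append(vendor)
--
--     return result
-- ===== SOURCE B (Python) =====
-- def resolve_vendor(vendor_infos: list) -> dict:
--     # Two passes: group every product under its vendor (duplicates allowed),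
--     # then dedup each group with dict.fromkeys, preserving first-seen order.
--     groups = {}
--     for vendor in vendor_infos:
--         if "$PRODUCT$" in vendor:
--             vendor, product = vendor.split("$PRODUCT$")
--         else:
--             product = vendor
--         groups.setdefault(vendor, []).append(product)
--     return {vendor: list(dict.fromkeys(products)) for vendor, products in groups.items()}
-- ===== Notes on version B (the rewrite author's own statement) =====
-- stated objective: simpler
-- what changed: A interleaves grouping and dedup with a membership branch per element inside one loop; B first groups every product under its vendor (duplicates allowed) via setdefault, then builds the result in a second pass deduping each group with dict.fromkeys.
import Mathlib
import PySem

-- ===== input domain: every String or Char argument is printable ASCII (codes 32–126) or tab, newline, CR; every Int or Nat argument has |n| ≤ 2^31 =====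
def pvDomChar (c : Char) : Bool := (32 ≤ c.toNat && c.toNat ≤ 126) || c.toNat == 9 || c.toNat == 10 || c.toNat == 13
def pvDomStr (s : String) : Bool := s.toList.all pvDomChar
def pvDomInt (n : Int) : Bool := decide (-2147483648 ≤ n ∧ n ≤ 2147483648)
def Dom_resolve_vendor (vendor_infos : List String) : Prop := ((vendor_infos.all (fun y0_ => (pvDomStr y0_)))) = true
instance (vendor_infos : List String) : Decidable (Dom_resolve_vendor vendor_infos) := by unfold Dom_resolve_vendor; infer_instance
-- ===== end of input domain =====

-- B replaces A's single loop with interleaved membership-test dedup by a two-pass form: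
-- group all products per vendor first, then dedup each group (dict.fromkeys) in a second pass.

-- ===== PORT A =====
-- the `| _ => result` arm is where Python's tuple unpack raises ValueError (excluded by Pre_)
def resolve_vendor (vendor_infos : List String) : List (String × List String) :=
  (vendor_infos.foldl (fun result vendor =>
    if PySem.Str.isIn "$PRODUCT$" vendor then
      match PySem.Str.split? vendor "$PRODUCT$" with
      | some [v, product] =>
        if result.contains v && !((result.getD v []).contains product) then
          result.insert v ((result.getD v []) ++ [product])
        else if !(result.contains v) then
          result.insert v [product]
        else
          result
      | _ => result
    else
      if !(result.contains vendor) then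
        result.insert vendor [vendor]
      else if (result.getD vendor []).contains vendor then
        result
      else
        result.insert vendor ((result.getD vendor []) ++ [vendor])
    ) PySem.Dict.empty).items

-- ===== PORT B =====
-- key/value extraction of B's first pass; the `else (s, s)` fallback of the length test
-- is where Python's tuple unpack raises ValueError (excluded by Pre_)
def pvKeyVal (s : String) : String × String :=
  if PySem.Str.isIn "$PRODUCT$" s then
    let parts := (PySem.Str.split? s "$PRODUCT$").getD []
    if parts.length == 2 then (parts.getD 0 s, parts.getD 1 s) else (s, s)
  else (s, s)

def resolve_vendor_alt (vendor_infos : List String) : List (String × List String) :=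
  let groups := vendor_infos.foldl (fun g s =>
      let kv := pvKeyVal s
      g.modify kv.1 [] (· ++ [kv.2])) PySem.Dict.empty
  groups.items.map (fun p => (p.1, PySem.List.dedup p.2))

-- ===== PRECONDITION & SPEC =====
-- Pre_ excludes exactly the inputs containing an entry with more than one "$PRODUCT$"
-- separator: there the tuple unpack of .split("$PRODUCT$") raises ValueError in A (and in B).
def Pre_resolve_vendor (vendor_infos : List String) : Prop :=
  ∀ s ∈ vendor_infos, PySem.Str.isIn "$PRODUCT$" s = true →
    ((PySem.Str.split? s "$PRODUCT$").getD []).length = 2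
instance (vendor_infos : List String) : Decidable (Pre_resolve_vendor vendor_infos) := by
  unfold Pre_resolve_vendor; infer_instance

def pvWitness_resolve_vendor : List String :=
  ["qemu", "qemu$PRODUCT$qemu", "redhat", "redhat$PRODUCT$enterprise_linux", "redhat$PRODUCT$openstack"]

def Spec_resolve_vendor (vendor_infos : List String) (out : List (String × List String)) : Prop :=
  out = resolve_vendor_alt vendor_infos
instance (vendor_infos : List String) (out : List (String × List String)) : Decidable (Spec_resolve_vendor vendor_infos out) := by
  unfold Spec_resolve_vendor; infer_instance

-- ===== CLAIM (what is proved, stated in full; the proofs are below) =====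
def Claim_equal_resolve_vendor : Prop := ∀ (vendor_infos : List String), Dom_resolve_vendor vendor_infos → Pre_resolve_vendor vendor_infos → Spec_resolve_vendor vendor_infos (resolve_vendor vendor_infos)

-- ===== LEMMAS AND PROOFS =====

-- A's loop step and B's first-pass step, named for the proofs (defeq to the ports' lambdas)
def pvStepA (result : PySem.Dict String (List String)) (vendor : String) : PySem.Dict String (List String) :=
  if PySem.Str.isIn "$PRODUCT$" vendor then
    match PySem.Str.split? vendor "$PRODUCT$" with
    | some [v, product] =>
      if result.contains v && !((result.getD v []).contains product) then
        result.insert v ((result.getD v []) ++ [product])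
      else if !(result.contains v) then
        result.insert v [product]
      else
        result
    | _ => result
  else
    if !(result.contains vendor) then
      result.insert vendor [vendor]
    else if (result.getD vendor []).contains vendor then
      result
    else
      result.insert vendor ((result.getD vendor []) ++ [vendor])

def pvStepB (g : PySem.Dict String (List String)) (s : String) : PySem.Dict String (List String) :=
  let kv := pvKeyVal s
  g.modify kv.1 [] (· ++ [kv.2])

-- value-wise image of a dict under per-group dedup
def pvMapDict (d : PySem.Dict String (List String)) : PySem.Dict String (List String) :=
  PySem.Dict.mk (d.items.map (fun p => (p.1, PySem.List.dedup p.2)))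

lemma get?_pvMapDict (d : PySem.Dict String (List String)) (k : String) :
    (pvMapDict d).get? k = (d.get? k).map PySem.List.dedup := by
  simp only [pvMapDict, PySem.Dict.get?, List.find?_map, Option.map_map]
  rfl

lemma contains_pvMapDict (d : PySem.Dict String (List String)) (k : String) :
    (pvMapDict d).contains k = d.contains k := by
  rw [PySem.Dict.contains_eq_isSome_get?, PySem.Dict.contains_eq_isSome_get?, get?_pvMapDict]
  cases d.get? k <;> rfl

lemma getD_pvMapDict (d : PySem.Dict String (List String)) (k : String) :
    (pvMapDict d).getD k [] = PySem.List.dedup (d.getD k []) := by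
  simp only [PySem.Dict.getD, get?_pvMapDict]
  cases d.get? k <;> rfl

lemma keys_pvMapDict (d : PySem.Dict String (List String)) :
    (pvMapDict d).keys = d.keys := by
  simp [pvMapDict, PySem.Dict.keys]

lemma pvMapDict_insert (d : PySem.Dict String (List String)) (k : String) (v : List String) :
    pvMapDict (d.insert k v) = (pvMapDict d).insert k (PySem.List.dedup v) := by
  by_cases h : d.contains k = true
  · apply PySem.Dict.ext
    rw [PySem.Dict.items_insert_of_contains _ _ (by rw [contains_pvMapDict]; exact h)]
    show (PySem.Dict.items (d.insert k v)).map _ = _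
    rw [PySem.Dict.items_insert_of_contains _ _ h]
    simp only [pvMapDict, List.map_map]
    refine List.map_congr_left (fun p _ => ?_)
    by_cases hk : p.1 = k <;> simp [hk]
  · have h' : d.contains k = false := by simpa using h
    apply PySem.Dict.ext
    rw [PySem.Dict.items_insert_of_not_contains _ _ (by rw [contains_pvMapDict]; exact h')]
    show (PySem.Dict.items (d.insert k v)).map _ = _
    rw [PySem.Dict.items_insert_of_not_contains _ _ h']
    simp [pvMapDict]

lemma insert_self_of_get? {d : PySem.Dict String (List String)} {k : String} {w : List String}
    (hnd : d.keys.Nodup) (h : d.get? k = some w) : d.insert k w = d := by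
  have hc : d.contains k = true := by
    rw [PySem.Dict.contains_eq_isSome_get?, h]; rfl
  apply PySem.Dict.ext
  rw [PySem.Dict.items_insert_of_contains _ _ hc]
  have hpt : ∀ p ∈ d.items, (if (p.1 == k) = true then (k, w) else p) = id p := by
    rintro ⟨p1, p2⟩ hp
    by_cases hk : p1 = k
    · have h2 : d.get? k = some p2 := by
        rw [← hk]
        exact PySem.Dict.get?_of_mem_items d hp hnd
      rw [h] at h2
      have hw : w = p2 := by injection h2
      simp [hk, hw]
    · simp [hk]
  rw [List.map_congr_left hpt, List.map_id]

lemma nodup_keys_pvStepB (d : PySem.Dict String (List String)) (s : String)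
    (h : d.keys.Nodup) : (pvStepB d s).keys.Nodup := by
  unfold pvStepB PySem.Dict.modify
  exact PySem.Dict.nodup_keys_insert _ _ _ h

-- the three possible outcomes of one update, phrased against the dedup-image dict
lemma pv_pass_case {d : PySem.Dict String (List String)} (hnd : d.keys.Nodup) {v p : String}
    (hc : d.contains v = true) (hm : p ∈ d.getD v []) :
    (pvMapDict d).insert v (PySem.List.dedup (d.getD v [] ++ [p])) = pvMapDict d := by
  have hded : PySem.List.dedup (d.getD v [] ++ [p]) = PySem.List.dedup (d.getD v []) := by
    rw [PySem.List.dedup_eq_ofList, PySem.List.dedup_eq_ofList, PySem.Set.ofList_append_singleton]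
    exact PySem.Set.add_of_mem (by rw [PySem.Set.mem_ofList]; exact hm)
  rw [hded]
  obtain ⟨w, hw⟩ : ∃ w, d.get? v = some w := by
    have h := PySem.Dict.contains_eq_isSome_get? d v
    rw [hc] at h
    exact Option.isSome_iff_exists.mp h.symm
  have hgd : d.getD v [] = w := by simp [PySem.Dict.getD, hw]
  apply insert_self_of_get? (by rw [keys_pvMapDict]; exact hnd)
  rw [get?_pvMapDict, hw, hgd]
  rfl

lemma pv_append_case {d : PySem.Dict String (List String)} {v p : String}
    (hm : p ∉ d.getD v []) :
    (pvMapDict d).insert v (PySem.List.dedup (d.getD v []) ++ [p])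
      = (pvMapDict d).insert v (PySem.List.dedup (d.getD v [] ++ [p])) := by
  have hded : PySem.List.dedup (d.getD v [] ++ [p])
      = PySem.List.dedup (d.getD v []) ++ [p] := by
    rw [PySem.List.dedup_eq_ofList, PySem.List.dedup_eq_ofList, PySem.Set.ofList_append_singleton]
    exact PySem.Set.add_of_not_mem (by rw [PySem.Set.mem_ofList]; exact hm)
  rw [hded]

lemma pv_new_case {d : PySem.Dict String (List String)} {v p : String}
    (hc : d.contains v = false) :
    (pvMapDict d).insert v [p] = (pvMapDict d).insert v (PySem.List.dedup (d.getD v [] ++ [p])) := by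
  rw [PySem.Dict.getD_of_not_contains d [] hc]
  rfl

-- membership on the deduped group, as the Bool test A performs
lemma contains_dedup (l : List String) (p : String) :
    (PySem.List.dedup l).contains p = l.contains p := by
  rw [PySem.List.dedup_eq_ofList]
  by_cases hm : p ∈ l
  · rw [List.contains_iff_mem.mpr hm,
      List.contains_iff_mem.mpr ((PySem.Set.mem_ofList l p).mpr hm)]
  · rw [(Bool.not_eq_true _).mp (fun h => hm (List.contains_iff_mem.mp h)),
      (Bool.not_eq_true _).mp (fun h => hm ((PySem.Set.mem_ofList l p).mp (List.contains_iff_mem.mp h)))]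

-- one loop step: A's interleaved update on the dedup-image equals the image of B's grouping update
lemma step_comm (d : PySem.Dict String (List String)) (s : String)
    (hnd : d.keys.Nodup)
    (hgood : PySem.Str.isIn "$PRODUCT$" s = true →
      ((PySem.Str.split? s "$PRODUCT$").getD []).length = 2) :
    pvStepA (pvMapDict d) s = pvMapDict (pvStepB d s) := by
  have main : ∀ v p : String, pvKeyVal s = (v, p) →
      pvMapDict (pvStepB d s) = (pvMapDict d).insert v (PySem.List.dedup (d.getD v [] ++ [p])) := by
    intro v p hkv
    unfold pvStepB PySem.Dict.modify
    rw [hkv]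
    exact pvMapDict_insert _ _ _
  unfold pvStepA
  by_cases hin : PySem.Str.isIn "$PRODUCT$" s = true
  · have hlen := hgood hin
    obtain ⟨a, b, hsp⟩ : ∃ a b, PySem.Str.split? s "$PRODUCT$" = some [a, b] := by
      cases hsp : PySem.Str.split? s "$PRODUCT$" with
      | none => rw [hsp] at hlen; simp at hlen
      | some l =>
        rw [hsp] at hlen
        match l, hlen with
        | [a, b], _ => exact ⟨a, b, rfl⟩
    have hkv : pvKeyVal s = (a, b) := by unfold pvKeyVal; rw [if_pos hin, hsp]; rfl
    rw [if_pos hin, hsp, main a b hkv]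
    simp only [contains_pvMapDict, getD_pvMapDict, contains_dedup]
    by_cases hc : d.contains a = true
    · by_cases hm : b ∈ d.getD a []
      · rw [List.contains_iff_mem.mpr hm]
        simp only [hc, Bool.not_true, Bool.and_false, Bool.false_eq_true, if_false]
        exact (pv_pass_case hnd hc hm).symm
      · rw [(Bool.not_eq_true _).mp (fun h => hm (List.contains_iff_mem.mp h))]
        simp only [hc, Bool.not_false, Bool.and_true, if_true]
        exact pv_append_case hm
    · have hc' : d.contains a = false := by simpa using hc
      rw [hc']
      simp only [Bool.false_and, Bool.false_eq_true, if_false, Bool.not_false, if_true]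
      exact pv_new_case hc'
  · have hin' : PySem.Str.isIn "$PRODUCT$" s = false := by simpa using hin
    have hkv : pvKeyVal s = (s, s) := by
      unfold pvKeyVal
      rw [if_neg (by rw [hin']; simp)]
    rw [if_neg (by rw [hin']; simp), main s s hkv]
    simp only [contains_pvMapDict, getD_pvMapDict, contains_dedup]
    by_cases hc : d.contains s = true
    · by_cases hm : s ∈ d.getD s []
      · rw [hc, List.contains_iff_mem.mpr hm]
        simp only [Bool.not_true, Bool.false_eq_true, if_false, if_true]
        exact (pv_pass_case hnd hc hm).symm
      · rw [hc, (Bool.not_eq_true _).mp (fun h => hm (List.contains_iff_mem.mp h))]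
        simp only [Bool.not_true, Bool.false_eq_true, if_false]
        exact pv_append_case hm
    · have hc' : d.contains s = false := by simpa using hc
      rw [hc']
      simp only [Bool.not_false, if_true]
      exact pv_new_case hc'

lemma fold_comm (l : List String) (d : PySem.Dict String (List String))
    (hnd : d.keys.Nodup)
    (hgood : ∀ s ∈ l, PySem.Str.isIn "$PRODUCT$" s = true →
      ((PySem.Str.split? s "$PRODUCT$").getD []).length = 2) :
    l.foldl pvStepA (pvMapDict d) = pvMapDict (l.foldl pvStepB d) := by
  induction l generalizing d with
  | nil => rfl
  | cons s t ih =>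
    simp only [List.foldl_cons]
    rw [step_comm d s hnd (hgood s (by simp))]
    exact ih _ (nodup_keys_pvStepB d s hnd) (fun x hx => hgood x (by simp [hx]))

-- ===== VERDICT (by name: the statement is the Claim_ definition above) =====
theorem resolve_vendor_spec : Claim_equal_resolve_vendor := by
  intro vendor_infos _ hpre
  unfold Spec_resolve_vendor
  show (vendor_infos.foldl pvStepA PySem.Dict.empty).items = _
  have hempty : (PySem.Dict.empty : PySem.Dict String (List String)) = pvMapDict PySem.Dict.empty := rfl
  rw [hempty, fold_comm vendor_infos PySem.Dict.empty (by simp [PySem.Dict.keys, PySem.Dict.empty]) hpre]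
  rfl
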